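-- pv_equiv track=rewrite | github.com/sizzleguyandy/run_coach | coach_core/engine/workouts.py | _assign_session_days
-- ===== SOURCE A (Python) =====
-- DAYS_ORDER = ["Mon", "Tue", "Wed", "Thu", "Fri", "Sat", "Sun"]
--
-- def _day_idx(day: str) -> int:
--     return DAYS_ORDER.index(day)
--
-- def _assign_session_days(
--     long_run_day: str,
--     quality_day: str,
--     extra_days: list,
-- ) -> dict[str, str]:
--     """
--     Map each day of the week to a session type using explicit athlete-chosen days.
--
--     Session types: 'quality', 'recovery', 'medium_long', 'long', 'rest'
--
--     Rules:
--       - long_run_day → always 'long'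
--       - quality_day  → always 'quality'
--       - extra_days   → assigned recovery / medium_long by position in week
--           * first extra after quality_day  → recovery (legs still tired from quality)
--           * middle extras                  → medium_long
--           * extra day after long_run_day   → recovery (post long-run flush)
--       - all other days → rest
--     """
--     assignment = {d: "rest" for d in DAYS_ORDER}
--     assignment[long_run_day] = "long"
--     assignment[quality_day]  = "quality"
--
--     if not extra_days:
--         return assignment
--
--     # Sort extra days in week order, grouped into pre-long-run and post-long-run
--     lr_idx = _day_idx(long_run_day)
--     q_idx  = _day_idx(quality_day)
--
--     def week_distance(day: str) -> int:
--         """Positions forward from quality_day (0=quality, 1=next day, ...)."""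
--         return (_day_idx(day) - q_idx) % 7
--
--     sorted_extras = sorted(extra_days, key=week_distance)
--
--     n = len(sorted_extras)
--
--     if n == 1:
--         # Single extra: medium_long is best (one key aerobic session)
--         assignment[sorted_extras[0]] = "medium_long"
--
--     elif n == 2:
--         # First extra (closer to quality) → recovery
--         # Second extra (closer to long run) → medium_long
--         assignment[sorted_extras[0]] = "recovery"
--         assignment[sorted_extras[1]] = "medium_long"
--
--     elif n == 3:
--         # recovery → medium_long → recovery
--         assignment[sorted_extras[0]] = "recovery"
--         assignment[sorted_extras[1]] = "medium_long"
--         assignment[sorted_extras[2]] = "recovery"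
--
--     else:
--         # 4+ extras: recovery, medium_long, recovery, then remaining = recovery
--         assignment[sorted_extras[0]] = "recovery"
--         assignment[sorted_extras[1]] = "medium_long"
--         assignment[sorted_extras[2]] = "recovery"
--         for d in sorted_extras[3:]:
--             assignment[d] = "recovery"
--
--     return assignment
-- ===== SOURCE B (Python) =====
-- DAYS_ORDER = ["Mon", "Tue", "Wed", "Thu", "Fri", "Sat", "Sun"]
--
--
-- def _assign_session_days(long_run_day, quality_day, extra_days):
--     """Single cyclic walk over the fixed 7-day week starting at quality_day: no
--     sorting and no positional indexing into the extras; each chosen day's label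
--     is decided on the spot from a running count of extras already passed."""
--     assignment = {d: "rest" for d in DAYS_ORDER}
--     assignment[long_run_day] = "long"
--     assignment[quality_day] = "quality"
--     if extra_days:
--         n = len(extra_days)
--         q = DAYS_ORDER.index(quality_day)
--         seen = 0
--         for step in range(7):
--             d = DAYS_ORDER[(q + step) % 7]
--             if d in extra_days:
--                 assignment[d] = "medium_long" if seen == min(n - 1, 1) else "recovery"
--                 seen += 1
--     return assignment
-- ===== Notes on version B (the rewrite author's own statement) =====
-- stated objective: alternative
-- what changed: A sorts the extras by cyclic distance from quality_day and assigns labels positionally through a four-way length ladder; B never sorts or indexes into the extras: it walks the fixed 7-day week once from quality_day with a membership test, deciding each label on the spot from a running counter.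
import Mathlib
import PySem

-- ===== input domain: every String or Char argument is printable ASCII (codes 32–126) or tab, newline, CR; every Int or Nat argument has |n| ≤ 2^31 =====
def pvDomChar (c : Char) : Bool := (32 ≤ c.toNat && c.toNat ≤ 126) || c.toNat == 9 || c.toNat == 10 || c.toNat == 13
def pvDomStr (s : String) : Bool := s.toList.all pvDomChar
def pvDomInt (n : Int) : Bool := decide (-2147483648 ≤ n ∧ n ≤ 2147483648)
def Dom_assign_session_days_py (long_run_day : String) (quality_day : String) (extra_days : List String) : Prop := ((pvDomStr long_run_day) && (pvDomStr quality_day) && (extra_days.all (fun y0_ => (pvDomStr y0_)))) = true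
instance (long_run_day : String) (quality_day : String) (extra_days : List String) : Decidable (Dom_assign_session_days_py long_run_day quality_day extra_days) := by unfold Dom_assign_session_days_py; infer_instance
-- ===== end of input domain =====

-- B replaces A's sort-then-positional-assignment (with its four-way length ladder) by a
-- single cyclic walk over the fixed 7-day week with a running counter (objective: alternative).

-- module constant DAYS_ORDER, shared by both versions
def pvDaysOrder : List String := ["Mon", "Tue", "Wed", "Thu", "Fri", "Sat", "Sun"]

-- _day_idx(day) = DAYS_ORDER.index(day); Python raises ValueError when absent (excluded
-- by Pre_), so the total form defaults to 0 there (never reached inside Pre_).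
def pvDayIdx (day : String) : Int := (((PySem.List.index? pvDaysOrder day).getD 0 : Nat) : Int)

-- ===== PORT A =====
def assign_session_days_py (long_run_day : String) (quality_day : String) (extra_days : List String) : List (String × String) :=
  let assignment : PySem.Dict String String :=
    ((pvDaysOrder.foldl (fun d day => d.insert day "rest") PySem.Dict.empty).insert
      long_run_day "long").insert quality_day "quality"
  if extra_days = [] then assignment.items
  else
    let _lr_idx := pvDayIdx long_run_day   -- computed (may raise) in Python; unused afterwards
    let q_idx := pvDayIdx quality_day
    let se := PySem.List.sorted extra_days (fun d => PySem.Int.mod (pvDayIdx d - q_idx) 7) false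
    let n := se.length
    if n = 1 then
      (assignment.insert (PySem.List.pyGetD se 0 "") "medium_long").items
    else if n = 2 then
      ((assignment.insert (PySem.List.pyGetD se 0 "") "recovery").insert
        (PySem.List.pyGetD se 1 "") "medium_long").items
    else if n = 3 then
      (((assignment.insert (PySem.List.pyGetD se 0 "") "recovery").insert
          (PySem.List.pyGetD se 1 "") "medium_long").insert
          (PySem.List.pyGetD se 2 "") "recovery").items
    else
      ((PySem.List.slice se (some 3) none).foldl (fun acc d => acc.insert d "recovery")
        (((assignment.insert (PySem.List.pyGetD se 0 "") "recovery").insert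
            (PySem.List.pyGetD se 1 "") "medium_long").insert
            (PySem.List.pyGetD se 2 "") "recovery")).items

-- ===== PORT B =====
def assign_session_days_py_alt (long_run_day : String) (quality_day : String) (extra_days : List String) : List (String × String) :=
  let assignment : PySem.Dict String String :=
    ((pvDaysOrder.foldl (fun d day => d.insert day "rest") PySem.Dict.empty).insert
      long_run_day "long").insert quality_day "quality"
  if extra_days = [] then assignment.items
  else
    let n : Int := extra_days.length
    let q := pvDayIdx quality_day
    -- DAYS_ORDER[(q+step)%7]: in range for every step when quality_day ∈ DAYS_ORDER (Pre_)
    ((PySem.List.pyRange 0 7 1).foldl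
      (fun (st : PySem.Dict String String × Int) step =>
        let d := PySem.List.pyGetD pvDaysOrder (PySem.Int.mod (q + step) 7) ""
        if extra_days.contains d then
          (st.1.insert d (if st.2 = min (n - 1) 1 then "medium_long" else "recovery"), st.2 + 1)
        else st)
      (assignment, 0)).1.items

-- ===== PRECONDITION & SPEC =====
-- Pre_ excludes the inputs on which A raises ValueError (nonempty extra_days with any day
-- argument not in DAYS_ORDER), and extra_days with duplicate entries: there A returns, but
-- which occurrence's positional label the repeated day ends up with is an accident of A's
-- dict re-assignment order (both programs' answers are defensible on such degenerate input).
def Pre_assign_session_days_py (long_run_day : String) (quality_day : String) (extra_days : List String) : Prop :=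
  extra_days ≠ [] →
    (long_run_day ∈ pvDaysOrder ∧ quality_day ∈ pvDaysOrder ∧
      (∀ d ∈ extra_days, d ∈ pvDaysOrder) ∧ extra_days.Nodup)
instance (long_run_day : String) (quality_day : String) (extra_days : List String) : Decidable (Pre_assign_session_days_py long_run_day quality_day extra_days) := by unfold Pre_assign_session_days_py; infer_instance

def pvWitness_assign_session_days_py : String × String × List String := ("Sun", "Tue", ["Thu", "Fri"])

def Spec_assign_session_days_py (long_run_day : String) (quality_day : String) (extra_days : List String) (out : List (String × String)) : Prop := out = assign_session_days_py_alt long_run_day quality_day extra_days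
instance (long_run_day : String) (quality_day : String) (extra_days : List String) (out : List (String × String)) : Decidable (Spec_assign_session_days_py long_run_day quality_day extra_days out) := by unfold Spec_assign_session_days_py; infer_instance

-- ===== CLAIM (what is proved, stated in full; the proofs are below) =====
def Claim_equal_assign_session_days_py : Prop := ∀ (long_run_day : String) (quality_day : String) (extra_days : List String), Dom_assign_session_days_py long_run_day quality_day extra_days → Pre_assign_session_days_py long_run_day quality_day extra_days → Spec_assign_session_days_py long_run_day quality_day extra_days (assign_session_days_py long_run_day quality_day extra_days)

-- ===== LEMMAS AND PROOFS =====

-- the counter fold both sides reduce to: insert each day with the label of its position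
def pvCFold (n : Int) (se : List String) (st : PySem.Dict String String × Int) :
    PySem.Dict String String × Int :=
  se.foldl (fun st d =>
    (st.1.insert d (if st.2 = min (n - 1) 1 then "medium_long" else "recovery"), st.2 + 1)) st

-- B's week walk IS the counter fold over the membership-filtered walk order
lemma walk_eq_cfold (extras : List String) (n : Int) (rot : List String)
    (st : PySem.Dict String String × Int) :
    rot.foldl (fun st d =>
        if extras.contains d then
          (st.1.insert d (if st.2 = min (n - 1) 1 then "medium_long" else "recovery"), st.2 + 1)
        else st) st
      = pvCFold n (rot.filter (fun d => extras.contains d)) st := by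
  induction rot generalizing st with
  | nil => rfl
  | cons a t ih =>
    by_cases h : a ∈ extras <;>
      simp only [List.foldl_cons, List.filter_cons, List.contains_iff_mem, h,
        if_true, if_false, pvCFold] at ih ⊢ <;>
      exact ih _

-- once the counter has passed the medium_long slot, the fold only writes "recovery"
lemma cfold_high (n : Int) (xs : List String) (d : PySem.Dict String String) (k : Int)
    (hk : min (n - 1) 1 < k) :
    (pvCFold n xs (d, k)).1 = xs.foldl (fun acc x => acc.insert x "recovery") d := by
  induction xs generalizing d k with
  | nil => rfl
  | cons a t ih =>
    simp only [pvCFold, List.foldl_cons] at ih ⊢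
    rw [if_neg (by omega)]
    exact ih _ _ (by omega)

-- A's sort-then-ladder equals the counter fold over the sorted extras
lemma ladder_eq_cfold (base : PySem.Dict String String) (se : List String) (hne : se ≠ []) :
    (if se.length = 1 then
      (base.insert (PySem.List.pyGetD se 0 "") "medium_long").items
    else if se.length = 2 then
      ((base.insert (PySem.List.pyGetD se 0 "") "recovery").insert
        (PySem.List.pyGetD se 1 "") "medium_long").items
    else if se.length = 3 then
      (((base.insert (PySem.List.pyGetD se 0 "") "recovery").insert
          (PySem.List.pyGetD se 1 "") "medium_long").insert
          (PySem.List.pyGetD se 2 "") "recovery").items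
    else
      ((PySem.List.slice se (some 3) none).foldl (fun acc d => acc.insert d "recovery")
        (((base.insert (PySem.List.pyGetD se 0 "") "recovery").insert
            (PySem.List.pyGetD se 1 "") "medium_long").insert
            (PySem.List.pyGetD se 2 "") "recovery")).items)
      = (pvCFold (se.length : Int) se (base, 0)).1.items := by
  match se with
  | [a] => simp [pvCFold]
  | [a, b] =>
    have h1 : PySem.List.pyGetD [a, b] 1 "" = b := by rw [PySem.List.pyGetD_ofNat']; rfl
    simp [h1, pvCFold]
  | [a, b, c] =>
    have h1 : PySem.List.pyGetD [a, b, c] 1 "" = b := by rw [PySem.List.pyGetD_ofNat']; rfl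
    have h2 : PySem.List.pyGetD [a, b, c] 2 "" = c := by rw [PySem.List.pyGetD_ofNat']; rfl
    simp [h1, h2, pvCFold]
  | a :: b :: c :: e :: rest =>
    have hslice : PySem.List.slice (a :: b :: c :: e :: rest) (some 3) none = e :: rest := by
      rw [show (3 : Int) = ((3 : Nat) : Int) by norm_num, PySem.List.slice_from_natCast]; rfl
    have h1 : PySem.List.pyGetD (a :: b :: c :: e :: rest) 1 "" = b := by
      rw [PySem.List.pyGetD_ofNat']; rfl
    have h2 : PySem.List.pyGetD (a :: b :: c :: e :: rest) 2 "" = c := by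
      rw [PySem.List.pyGetD_ofNat']; rfl
    have hstep : pvCFold ((a :: b :: c :: e :: rest).length : Int) (a :: b :: c :: e :: rest)
        (base, 0)
        = pvCFold ((a :: b :: c :: e :: rest).length : Int) (e :: rest)
            (((base.insert a "recovery").insert b "medium_long").insert c "recovery", 3) := by
      simp only [pvCFold, List.foldl_cons, List.length_cons]
      rw [if_neg (by omega), if_pos (by omega),
        if_neg (by omega)]
      norm_num
    simp only [List.length_cons, hslice, h1, h2, PySem.List.pyGetD_zero_cons,
      if_neg (by omega : ¬ rest.length + 1 + 1 + 1 + 1 = 1),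
      if_neg (by omega : ¬ rest.length + 1 + 1 + 1 + 1 = 2),
      if_neg (by omega : ¬ rest.length + 1 + 1 + 1 + 1 = 3)]
    rw [show ((rest.length + 1 + 1 + 1 + 1 : Nat) : Int)
        = ((a :: b :: c :: e :: rest).length : Int) by simp]
    rw [hstep, cfold_high _ _ _ _ (by omega)]

-- the one lemma the 7 quality_day cases share: with the walk order rot named explicitly,
-- A's sorted extras equal rot filtered by membership, and both sides are pvCFold on it
lemma main_case (long_run_day quality_day : String) (extras : List String) (rot : List String)
    (hne : extras ≠ []) (hnd : extras.Nodup)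
    (hsub : ∀ d ∈ extras, d ∈ rot)
    (hrotnd : rot.Nodup)
    (hpw : rot.Pairwise (fun a b =>
      PySem.Int.mod (pvDayIdx a - pvDayIdx quality_day) 7 <
        PySem.Int.mod (pvDayIdx b - pvDayIdx quality_day) 7))
    (hmap : (PySem.List.pyRange 0 7 1).map
        (fun step => PySem.List.pyGetD pvDaysOrder (PySem.Int.mod (pvDayIdx quality_day + step) 7) "")
      = rot) :
    assign_session_days_py long_run_day quality_day extras
      = assign_session_days_py_alt long_run_day quality_day extras := by
  have hperm : (rot.filter (fun d => extras.contains d)).Perm extras := by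
    refine (List.perm_ext_iff_of_nodup (hrotnd.filter _) hnd).mpr ?_
    intro a
    simp only [List.mem_filter, List.contains_iff_mem]
    exact ⟨fun h => h.2, fun h => ⟨hsub a h, h⟩⟩
  have hfilt : PySem.List.sorted extras
      (fun d => PySem.Int.mod (pvDayIdx d - pvDayIdx quality_day) 7) false
      = rot.filter (fun d => extras.contains d) := by
    apply PySem.List.sorted_eq_of_perm_of_pairwise_lt _ _ _ hperm
    exact List.Pairwise.sublist List.filter_sublist hpw
  have hflen : (((rot.filter (fun d => extras.contains d)).length : Nat) : Int)
      = (extras.length : Int) := by exact_mod_cast hperm.length_eq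
  have hfne : rot.filter (fun d => extras.contains d) ≠ [] := by
    intro h; rw [h] at hperm; exact hne hperm.symm.eq_nil
  have hB : assign_session_days_py_alt long_run_day quality_day extras
      = (pvCFold (extras.length : Int) (rot.filter (fun d => extras.contains d))
          (((pvDaysOrder.foldl (fun d day => d.insert day "rest") PySem.Dict.empty).insert
            long_run_day "long").insert quality_day "quality", 0)).1.items := by
    have hm : ((PySem.List.pyRange 0 7 1).map
        (fun step => PySem.List.pyGetD pvDaysOrder
          (PySem.Int.mod (pvDayIdx quality_day + step) 7) "")).foldl
        (fun (st : PySem.Dict String String × Int) d =>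
          if extras.contains d then
            (st.1.insert d (if st.2 = min ((extras.length : Int) - 1) 1 then "medium_long"
              else "recovery"), st.2 + 1)
          else st)
        (((pvDaysOrder.foldl (fun d day => d.insert day "rest") PySem.Dict.empty).insert
          long_run_day "long").insert quality_day "quality", 0)
      = (PySem.List.pyRange 0 7 1).foldl
        (fun (st : PySem.Dict String String × Int) step =>
          let d := PySem.List.pyGetD pvDaysOrder (PySem.Int.mod (pvDayIdx quality_day + step) 7) ""
          if extras.contains d then
            (st.1.insert d (if st.2 = min ((extras.length : Int) - 1) 1 then "medium_long"
              else "recovery"), st.2 + 1)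
          else st)
        (((pvDaysOrder.foldl (fun d day => d.insert day "rest") PySem.Dict.empty).insert
          long_run_day "long").insert quality_day "quality", 0) := List.foldl_map ..
    rw [hmap, walk_eq_cfold] at hm
    unfold assign_session_days_py_alt
    simp only [if_neg hne]
    exact congrArg (fun p => p.1.items) hm.symm
  have hA : assign_session_days_py long_run_day quality_day extras
      = (pvCFold (extras.length : Int) (rot.filter (fun d => extras.contains d))
          (((pvDaysOrder.foldl (fun d day => d.insert day "rest") PySem.Dict.empty).insert
            long_run_day "long").insert quality_day "quality", 0)).1.items := by
    unfold assign_session_days_py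
    simp only [if_neg hne, hfilt]
    rw [ladder_eq_cfold _ _ hfne, hflen]
  rw [hA, hB]

theorem assign_session_days_py_spec : Claim_equal_assign_session_days_py := by
  intro lr q extras _hdom hpre
  unfold Spec_assign_session_days_py
  by_cases hne : extras = []
  · subst hne
    unfold assign_session_days_py assign_session_days_py_alt
    simp
  · obtain ⟨hlr, hq, hsub, hnd⟩ := hpre hne
    have hsub' : ∀ (rot : List String), (∀ d, d ∈ pvDaysOrder → d ∈ rot) →
        ∀ d ∈ extras, d ∈ rot := fun rot h d hd => h d (hsub d hd)
    simp only [pvDaysOrder, List.mem_cons, List.not_mem_nil, or_false] at hq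
    rcases hq with rfl | rfl | rfl | rfl | rfl | rfl | rfl
    · exact main_case lr _ extras ["Mon", "Tue", "Wed", "Thu", "Fri", "Sat", "Sun"]
        hne hnd (hsub' _ (by decide)) (by decide) (by decide) (by decide)
    · exact main_case lr _ extras ["Tue", "Wed", "Thu", "Fri", "Sat", "Sun", "Mon"]
        hne hnd (hsub' _ (by decide)) (by decide) (by decide) (by decide)
    · exact main_case lr _ extras ["Wed", "Thu", "Fri", "Sat", "Sun", "Mon", "Tue"]
        hne hnd (hsub' _ (by decide)) (by decide) (by decide) (by decide)
    · exact main_case lr _ extras ["Thu", "Fri", "Sat", "Sun", "Mon", "Tue", "Wed"]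
        hne hnd (hsub' _ (by decide)) (by decide) (by decide) (by decide)
    · exact main_case lr _ extras ["Fri", "Sat", "Sun", "Mon", "Tue", "Wed", "Thu"]
        hne hnd (hsub' _ (by decide)) (by decide) (by decide) (by decide)
    · exact main_case lr _ extras ["Sat", "Sun", "Mon", "Tue", "Wed", "Thu", "Fri"]
        hne hnd (hsub' _ (by decide)) (by decide) (by decide) (by decide)
    · exact main_case lr _ extras ["Sun", "Mon", "Tue", "Wed", "Thu", "Fri", "Sat"]
        hne hnd (hsub' _ (by decide)) (by decide) (by decide) (by decide)
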